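-- pv_equiv track=rewrite | github.com/AusBoone/Melody-Generator | melody_generator/phrase_planner.py | infill_skeleton
-- ===== SOURCE A (Python) =====
-- from typing import List, Tuple
--
-- def infill_skeleton(skeleton: List[tuple[int, str]], motif: List[str]) -> List[str]:
--     """Fill notes between ``skeleton`` anchors using ``motif``.
--
--     Parameters
--     ----------
--     skeleton:
--         Ordered list of ``(index, note)`` pairs starting at ``0``.
--     motif:
--         Short sequence repeated to fill the gaps. Must not be empty.
--
--     Returns
--     -------
--     List[str]
--         Full melody including anchor notes and interpolated motif notes.
--
--     Raises
--     ------
--     ValueError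
--         If ``skeleton`` or ``motif`` is empty or indices are not ascending
--         from ``0``.
--     """
--
--     if not skeleton:
--         raise ValueError("skeleton must not be empty")
--     if not motif:
--         raise ValueError("motif must not be empty")
--
--     indices = [idx for idx, _ in skeleton]
--     if indices[0] != 0 or indices != sorted(indices):
--         raise ValueError("skeleton indices must start at 0 and be ascending")
--
--     melody: List[str] = []
--     motif_pos = 0
--     for i, (idx, note) in enumerate(skeleton):
--         melody.append(note)
--         next_idx = skeleton[i + 1][0] if i + 1 < len(skeleton) else idx
--         gap = next_idx - idx - 1
--         for _ in range(gap):
--             melody.append(motif[motif_pos % len(motif)])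
--             motif_pos += 1
--     return melody
-- ===== SOURCE B (Python) =====
-- from typing import List
--
--
-- def infill_skeleton(skeleton: List[tuple[int, str]], motif: List[str]) -> List[str]:
--     """Scatter-then-fill rewrite: place each anchor note into a preallocated
--     slot array at its computed output position, then scan once filling the
--     empty slots with the cycling motif."""
--     if not skeleton:
--         raise ValueError("skeleton must not be empty")
--     if not motif:
--         raise ValueError("motif must not be empty")
--
--     indices = [idx for idx, _ in skeleton]
--     if indices[0] != 0 or any(b < a for a, b in zip(indices, indices[1:])):
--         raise ValueError("skeleton indices must start at 0 and be ascending")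
--
--     # output slot of each anchor: a prefix-sum over 1 + clamped gap
--     slots = []
--     p = 0
--     for i, (idx, _) in enumerate(skeleton):
--         slots.append(p)
--         nxt = skeleton[i + 1][0] if i + 1 < len(skeleton) else idx
--         p += 1 + max(0, nxt - idx - 1)
--
--     # scatter anchors into the slot array
--     melody = [None] * p
--     for slot, (_, note) in zip(slots, skeleton):
--         melody[slot] = note
--
--     # fill the remaining holes with the cycling motif
--     out: List[str] = []
--     k = 0
--     for cell in melody:
--         if cell is None:
--             out.append(motif[k % len(motif)])
--             k += 1
--         else:
--             out.append(cell)
--     return out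
-- ===== Notes on version B (the rewrite author's own statement) =====
-- stated objective: alternative
-- what changed: Replaces A's single fused append loop with nested per-gap motif loops by a scatter-then-fill algorithm: compute each anchor's output slot by a prefix sum, scatter the anchor notes into a preallocated None slot array by index, then one scan replaces the remaining holes with the cycling motif.
import Mathlib
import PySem

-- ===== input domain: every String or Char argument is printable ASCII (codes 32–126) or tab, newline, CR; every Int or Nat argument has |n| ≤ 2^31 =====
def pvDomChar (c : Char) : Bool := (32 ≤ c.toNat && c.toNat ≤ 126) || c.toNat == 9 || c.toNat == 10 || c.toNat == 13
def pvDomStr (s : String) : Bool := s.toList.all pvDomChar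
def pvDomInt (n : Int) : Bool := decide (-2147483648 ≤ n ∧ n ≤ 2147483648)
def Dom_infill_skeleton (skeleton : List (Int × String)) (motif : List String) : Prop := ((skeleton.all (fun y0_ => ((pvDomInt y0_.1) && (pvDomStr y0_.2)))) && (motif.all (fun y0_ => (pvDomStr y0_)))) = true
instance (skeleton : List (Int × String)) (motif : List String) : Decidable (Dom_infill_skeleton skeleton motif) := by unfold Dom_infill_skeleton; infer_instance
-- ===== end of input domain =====

-- B replaces A's fused append loop (nested per-gap motif loop) by scatter-then-fill: prefix-sum
-- anchor slots, scatter notes into a preallocated hole array, one scan fills holes with the motif.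
-- Equivalence is about the return value; neither program mutates its arguments.

-- helper used by both ports: the expression motif[pos % len(motif)] both Python sources contain
def motifNote (motif : List String) (pos : Int) : String :=
  (PySem.List.pyGet? motif (PySem.Int.mod pos (motif.length : Int))).getD ""

-- ===== PORT A =====
def infill_skeleton (skeleton : List (Int × String)) (motif : List String) : List String :=
  let indices := skeleton.map (fun p : Int × String => p.1)
  if skeleton = [] ∨ motif = [] ∨ indices.headD 0 ≠ 0 ∨
      indices ≠ PySem.List.sorted indices (fun x => x) false then
    []  -- Python raises ValueError on these inputs; excluded by Pre_
  else
    ((PySem.List.enumerate skeleton 0).foldl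
      (fun (st : List String × Int) (ip : Int × (Int × String)) =>
        let melody := st.1 ++ [ip.2.2]
        let next_idx := if ip.1 + 1 < (skeleton.length : Int) then
            ((PySem.List.pyGet? skeleton (ip.1 + 1)).getD (0, "")).1
          else ip.2.1
        let gap := next_idx - ip.2.1 - 1
        (PySem.List.pyRange 0 gap 1).foldl
          (fun (st2 : List String × Int) (_ : Int) =>
            (st2.1 ++ [motifNote motif st2.2], st2.2 + 1))
          (melody, st.2))
      ([], 0)).1

-- ===== PORT B =====
def infill_skeleton_alt (skeleton : List (Int × String)) (motif : List String) : List String :=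
  if skeleton = [] ∨ motif = [] then []  -- Python raises ValueError; excluded by Pre_
  else
    let indices := skeleton.map (fun p : Int × String => p.1)
    if indices.headD 0 ≠ 0 ∨ (indices.zip indices.tail).any (fun ab : Int × Int => decide (ab.2 < ab.1)) then
      []  -- Python raises ValueError; excluded by Pre_
    else
      -- pass 1: output slot of each anchor (prefix sum over 1 + clamped gap)
      let sp := (PySem.List.enumerate skeleton 0).foldl
        (fun (st : List Int × Int) (ip : Int × (Int × String)) =>
          let nxt := if ip.1 + 1 < (skeleton.length : Int) then
              ((PySem.List.pyGet? skeleton (ip.1 + 1)).getD (0, "")).1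
            else ip.2.1
          (st.1 ++ [st.2], st.2 + 1 + max 0 (nxt - ip.2.1 - 1)))
        ([], 0)
      -- pass 2: scatter anchor notes into a preallocated hole array
      let melody := (sp.1.zip skeleton).foldl
        (fun (arr : List (Option String)) (sn : Int × (Int × String)) =>
          arr.set sn.1.toNat (some sn.2.2))
        (List.replicate sp.2.toNat (none : Option String))
      -- pass 3: fill the holes with the cycling motif
      (melody.foldl
        (fun (st : List String × Int) (cell : Option String) =>
          match cell with
          | none => (st.1 ++ [motifNote motif st.2], st.2 + 1)
          | some s => (st.1 ++ [s], st.2))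
        ([], 0)).1

-- ===== PRECONDITION & SPEC =====
-- Pre_ excludes exactly the inputs where the Python A raises ValueError (empty skeleton or motif,
-- first index not 0, indices not non-decreasing); B raises there too.
def Pre_infill_skeleton (skeleton : List (Int × String)) (motif : List String) : Prop :=
  skeleton ≠ [] ∧ motif ≠ [] ∧ (skeleton.map (fun p : Int × String => p.1)).headD 0 = 0 ∧
  (skeleton.map (fun p : Int × String => p.1)).Pairwise (· ≤ ·)
instance (skeleton : List (Int × String)) (motif : List String) : Decidable (Pre_infill_skeleton skeleton motif) := by unfold Pre_infill_skeleton; infer_instance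

def pvWitness_infill_skeleton : (List (Int × String)) × List String :=
  ([(0, "C"), (3, "E"), (5, "G")], ["x", "y"])

def Spec_infill_skeleton (skeleton : List (Int × String)) (motif : List String) (out : List String) : Prop := out = infill_skeleton_alt skeleton motif
instance (skeleton : List (Int × String)) (motif : List String) (out : List String) : Decidable (Spec_infill_skeleton skeleton motif out) := by unfold Spec_infill_skeleton; infer_instance

-- ===== CLAIM (what is proved, stated in full; the proofs are below) =====
def Claim_equal_infill_skeleton : Prop := ∀ (skeleton : List (Int × String)) (motif : List String), Dom_infill_skeleton skeleton motif → Pre_infill_skeleton skeleton motif → Spec_infill_skeleton skeleton motif (infill_skeleton skeleton motif)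

-- ===== LEMMAS AND PROOFS =====

-- common reference shape: the fill segment of g motif notes starting at cycle position p
def fillSeg (motif : List String) (p : Int) (g : Nat) : List String :=
  (List.range g).map (fun j : Nat => motifNote motif (p + (j : Int)))

-- per-anchor clamped gap sum
def gapsSum (sk : List (Int × String)) : Nat :=
  match sk with
  | [] => 0
  | [_] => 0
  | x :: y :: r => (y.1 - x.1 - 1).toNat + gapsSum (y :: r)

-- reference result: anchor note, then its fill segment, cycle position threaded through
def specGo (motif : List String) (sk : List (Int × String)) (p : Int) : List String :=
  match sk with
  | [] => []
  | [x] => [x.2]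
  | x :: y :: r =>
      x.2 :: (fillSeg motif p (y.1 - x.1 - 1).toNat ++
              specGo motif (y :: r) (p + (y.1 - x.1 - 1).toNat))

-- B-side reference shapes
def patLen (sk : List (Int × String)) : Nat := sk.length + gapsSum sk

def pattern : List (Int × String) → List (Option String)
  | [] => []
  | [x] => [some x.2]
  | x :: y :: r =>
      some x.2 :: (List.replicate (y.1 - x.1 - 1).toNat none ++ pattern (y :: r))

def slotsOf : List (Int × String) → Nat → List Int
  | [], _ => []
  | [_], p => [(p : Int)]
  | x :: y :: r, p => (p : Int) :: slotsOf (y :: r) (p + 1 + (y.1 - x.1 - 1).toNat)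

theorem fillSeg_succ (motif : List String) (p : Int) (n : Nat) :
    fillSeg motif p (n + 1) = fillSeg motif p n ++ [motifNote motif (p + n)] := by
  simp [fillSeg, List.range_succ]

theorem fillSeg_cons (motif : List String) (p : Int) (n : Nat) :
    fillSeg motif p (n + 1) = motifNote motif p :: fillSeg motif (p + 1) n := by
  rw [fillSeg, List.range_succ_eq_map, List.map_cons, List.map_map]
  refine congrArg₂ List.cons (by norm_num) ?_
  rw [fillSeg]
  apply List.map_congr_left
  intro j _
  simp only [Function.comp_apply]
  congr 1
  push_cast; ring

theorem innerFold (motif : List String) :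
    ∀ (n : Nat) (m : List String) (p : Int),
      (List.range n).foldl
        (fun (st2 : List String × Int) (_ : Nat) =>
          (st2.1 ++ [motifNote motif st2.2], st2.2 + 1)) (m, p)
      = (m ++ fillSeg motif p n, p + n) := by
  intro n
  induction n with
  | zero => intro m p; simp [fillSeg]
  | succ k ih =>
      intro m p
      rw [List.range_succ, List.foldl_append, ih]
      simp [fillSeg_succ]
      omega

theorem innerA (motif : List String) (g : Int) (m : List String) (p : Int) :
    (PySem.List.pyRange 0 g 1).foldl
      (fun (st2 : List String × Int) (_ : Int) =>
        (st2.1 ++ [motifNote motif st2.2], st2.2 + 1)) (m, p)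
    = (m ++ fillSeg motif p g.toNat, p + g.toNat) := by
  rw [PySem.List.pyRange_one, List.foldl_map, Int.sub_zero]
  exact innerFold motif g.toNat m p

theorem outerA (motif : List String) (full : List (Int × String)) :
    ∀ (suf pre : List (Int × String)), full = pre ++ suf → ∀ (m : List String) (p : Int),
      (PySem.List.enumerate suf (pre.length : Int)).foldl
        (fun (st : List String × Int) (ip : Int × (Int × String)) =>
          let melody := st.1 ++ [ip.2.2]
          let next_idx := if ip.1 + 1 < (full.length : Int) then
              ((PySem.List.pyGet? full (ip.1 + 1)).getD (0, "")).1
            else ip.2.1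
          let gap := next_idx - ip.2.1 - 1
          (PySem.List.pyRange 0 gap 1).foldl
            (fun (st2 : List String × Int) (_ : Int) =>
              (st2.1 ++ [motifNote motif st2.2], st2.2 + 1))
            (melody, st.2))
        (m, p)
      = (m ++ specGo motif suf p, p + gapsSum suf) := by
  intro suf
  induction suf with
  | nil => intro pre _ m p; simp [PySem.List.enumerate, specGo, gapsSum]
  | cons x rest ih =>
      intro pre hfull m p
      rw [PySem.List.enumerate_cons, List.foldl_cons]
      cases rest with
      | nil =>
          have hcond : ¬ ((pre.length : Int) + 1 < (full.length : Int)) := by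
            subst hfull; simp
          simp only [hcond, if_false]
          have : x.1 - x.1 - 1 = (-1 : Int) := by omega
          rw [this, PySem.List.pyRange_one_eq_nil (by omega)]
          simp [PySem.List.enumerate, specGo, gapsSum]
      | cons y rest' =>
          have hcond : (pre.length : Int) + 1 < (full.length : Int) := by
            subst hfull; simp
          simp only [hcond, if_true]
          have hget : PySem.List.pyGet? full ((pre.length : Int) + 1) = some y := by
            subst hfull
            have h1 : ((pre.length : Int) + 1) = ((pre.length : Int) + ((1 : Nat) : Int)) := by
              push_cast; ring
            rw [h1, PySem.List.pyGet?_append_right]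
            rfl
          rw [hget]
          simp only [Option.getD_some]
          rw [innerA]
          have hfull' : full = (pre ++ [x]) ++ (y :: rest') := by
            rw [hfull]; simp
          have hlen : ((pre ++ [x]).length : Int) = (pre.length : Int) + 1 := by
            simp
          have := ih (pre ++ [x]) hfull'
            (m ++ [x.2] ++ fillSeg motif p (y.1 - x.1 - 1).toNat)
            (p + ((y.1 - x.1 - 1).toNat : Int))
          rw [hlen] at this
          rw [this]
          simp only [specGo, gapsSum, Prod.mk.injEq]
          refine ⟨by simp [List.append_assoc], by push_cast; omega⟩

-- B pass 1: the slots fold produces the structural slot list and the pattern length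
theorem outerSlots (full : List (Int × String)) :
    ∀ (suf pre : List (Int × String)), full = pre ++ suf → ∀ (acc : List Int) (p : Nat),
      (PySem.List.enumerate suf (pre.length : Int)).foldl
        (fun (st : List Int × Int) (ip : Int × (Int × String)) =>
          let nxt := if ip.1 + 1 < (full.length : Int) then
              ((PySem.List.pyGet? full (ip.1 + 1)).getD (0, "")).1
            else ip.2.1
          (st.1 ++ [st.2], st.2 + 1 + max 0 (nxt - ip.2.1 - 1)))
        (acc, (p : Int))
      = (acc ++ slotsOf suf p, ((p + patLen suf : Nat) : Int)) := by
  intro suf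
  induction suf with
  | nil => intro pre _ acc p; simp [PySem.List.enumerate, slotsOf, patLen, gapsSum]
  | cons x rest ih =>
      intro pre hfull acc p
      rw [PySem.List.enumerate_cons, List.foldl_cons]
      cases rest with
      | nil =>
          have hcond : ¬ ((pre.length : Int) + 1 < (full.length : Int)) := by
            subst hfull; simp
          simp only [hcond, if_false]
          have : max 0 (x.1 - x.1 - 1) = (0 : Int) := by omega
          rw [this]
          simp [PySem.List.enumerate, slotsOf, patLen, gapsSum]
      | cons y rest' =>
          have hcond : (pre.length : Int) + 1 < (full.length : Int) := by
            subst hfull; simp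
          simp only [hcond, if_true]
          have hget : PySem.List.pyGet? full ((pre.length : Int) + 1) = some y := by
            subst hfull
            have h1 : ((pre.length : Int) + 1) = ((pre.length : Int) + ((1 : Nat) : Int)) := by
              push_cast; ring
            rw [h1, PySem.List.pyGet?_append_right]
            rfl
          rw [hget]
          simp only [Option.getD_some]
          have hfull' : full = (pre ++ [x]) ++ (y :: rest') := by rw [hfull]; simp
          have hlen : ((pre ++ [x]).length : Int) = (pre.length : Int) + 1 := by simp
          have hstep : (p : Int) + 1 + max 0 (y.1 - x.1 - 1)
              = ((p + 1 + (y.1 - x.1 - 1).toNat : Nat) : Int) := by push_cast; omega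
          rw [hstep]
          have := ih (pre ++ [x]) hfull' (acc ++ [(p : Int)]) (p + 1 + (y.1 - x.1 - 1).toNat)
          rw [hlen] at this
          rw [this]
          simp only [slotsOf, Prod.mk.injEq]
          refine ⟨by simp, ?_⟩
          simp only [patLen, gapsSum, List.length_cons]
          push_cast; omega

-- setting at the boundary of a prefix
theorem set_at_prefix {α : Type} (v : α) :
    ∀ (l1 l2 : List α), (l1 ++ l2).set l1.length v = l1 ++ l2.set 0 v := by
  intro l1
  induction l1 with
  | nil => intro l2; simp
  | cons a t ih => intro l2; simp [ih]

-- B pass 2: scattering into the hole array yields the anchor/hole pattern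
theorem scatterFold :
    ∀ (suf : List (Int × String)) (pre : List (Option String)),
      ((slotsOf suf pre.length).zip suf).foldl
        (fun (arr : List (Option String)) (sn : Int × (Int × String)) =>
          arr.set sn.1.toNat (some sn.2.2))
        (pre ++ List.replicate (patLen suf) (none : Option String))
      = pre ++ pattern suf := by
  intro suf
  induction suf with
  | nil => intro pre; simp [slotsOf, patLen, gapsSum, pattern]
  | cons x rest ih =>
      intro pre
      cases rest with
      | nil =>
          simp only [slotsOf, pattern, List.zip_cons_cons,
            List.zip_nil_right, List.foldl_cons, List.foldl_nil]
          have h1 : ((pre.length : Int)).toNat = pre.length := by simp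
          have h2 : patLen [x] = 1 := by simp [patLen, gapsSum]
          rw [h1, h2, List.replicate_one, set_at_prefix]
          rfl
      | cons y r =>
          simp only [slotsOf, List.zip_cons_cons, List.foldl_cons]
          have h1 : ((pre.length : Int)).toNat = pre.length := by simp
          rw [h1]
          have hsplit : List.replicate (patLen (x :: y :: r)) (none : Option String)
              = none :: (List.replicate (y.1 - x.1 - 1).toNat none
                  ++ List.replicate (patLen (y :: r)) none) := by
            have hp : patLen (x :: y :: r)
                = 1 + ((y.1 - x.1 - 1).toNat + patLen (y :: r)) := by
              simp [patLen, gapsSum]; omega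
            rw [hp, List.replicate_add, List.replicate_add, List.replicate_one]
            rfl
          rw [hsplit, set_at_prefix]
          have hre : (pre ++ (none :: (List.replicate (y.1 - x.1 - 1).toNat none
                  ++ List.replicate (patLen (y :: r)) none)).set 0 (some x.2))
              = (pre ++ some x.2 :: List.replicate (y.1 - x.1 - 1).toNat none)
                  ++ List.replicate (patLen (y :: r)) none := by
            simp [List.set]
          rw [hre]
          have hlen : (pre ++ some x.2 :: List.replicate (y.1 - x.1 - 1).toNat none).length
              = pre.length + 1 + (y.1 - x.1 - 1).toNat := by simp; omega
          have := ih (pre ++ some x.2 :: List.replicate (y.1 - x.1 - 1).toNat none)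
          rw [hlen] at this
          rw [this]
          simp [pattern]

-- B pass 3, hole run: filling g holes advances the cycle by g
theorem fillNones (motif : List String) :
    ∀ (g : Nat) (acc : List String) (k : Int),
      (List.replicate g (none : Option String)).foldl
        (fun (st : List String × Int) (cell : Option String) =>
          match cell with
          | none => (st.1 ++ [motifNote motif st.2], st.2 + 1)
          | some s => (st.1 ++ [s], st.2))
        (acc, k)
      = (acc ++ fillSeg motif k g, k + g) := by
  intro g
  induction g with
  | zero => intro acc k; simp [fillSeg]
  | succ n ih =>
      intro acc k
      rw [List.replicate_succ, List.foldl_cons]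
      simp only
      rw [ih, fillSeg_cons]
      simp only [Prod.mk.injEq]
      refine ⟨by simp, by push_cast; omega⟩

-- B pass 3: filling the pattern's holes reproduces the reference melody
theorem fillFold (motif : List String) :
    ∀ (suf : List (Int × String)) (acc : List String) (k : Int),
      (pattern suf).foldl
        (fun (st : List String × Int) (cell : Option String) =>
          match cell with
          | none => (st.1 ++ [motifNote motif st.2], st.2 + 1)
          | some s => (st.1 ++ [s], st.2))
        (acc, k)
      = (acc ++ specGo motif suf k, k + gapsSum suf) := by
  intro suf
  induction suf with
  | nil => intro acc k; simp [pattern, specGo, gapsSum]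
  | cons x rest ih =>
      cases rest with
      | nil => intro acc k; simp [pattern, specGo, gapsSum]
      | cons y r =>
          intro acc k
          simp only [pattern, List.foldl_cons, List.foldl_append]
          rw [fillNones]
          rw [ih (acc ++ [x.2] ++ fillSeg motif k (y.1 - x.1 - 1).toNat)
              (k + ((y.1 - x.1 - 1).toNat : Int))]
          simp only [specGo, gapsSum, Prod.mk.injEq]
          refine ⟨by simp [List.append_assoc], by push_cast; omega⟩

theorem pairwise_zip_not_lt :
    ∀ (l : List Int), l.Pairwise (· ≤ ·) →
      (l.zip l.tail).any (fun ab : Int × Int => decide (ab.2 < ab.1)) = false := by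
  intro l
  induction l with
  | nil => intro _; simp
  | cons a rest ih =>
      intro hp
      cases rest with
      | nil => simp
      | cons b r =>
          rw [List.pairwise_cons] at hp
          simp only [List.tail_cons, List.zip_cons_cons, List.any_cons]
          have hab : ¬ (b < a) := not_lt.mpr (hp.1 b (by simp))
          simp [hab]
          have := ih hp.2
          simpa using this

-- ===== VERDICT (by name: the statement is the Claim_ definition above) =====
set_option maxHeartbeats 1000000 in
theorem infill_skeleton_spec : Claim_equal_infill_skeleton := by
  intro skeleton motif _ hpre
  obtain ⟨h1, h2, h3, h4⟩ := hpre
  unfold Spec_infill_skeleton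
  have hsorted : skeleton.map (fun p : Int × String => p.1)
      = PySem.List.sorted (skeleton.map (fun p : Int × String => p.1)) (fun x => x) false := by
    symm
    apply PySem.List.sorted_eq_self_of_pairwise
    exact h4
  have hany := pairwise_zip_not_lt (skeleton.map (fun p : Int × String => p.1)) h4
  have e1 : infill_skeleton skeleton motif = specGo motif skeleton 0 := by
    unfold infill_skeleton
    rw [if_neg (by push Not; exact ⟨h1, h2, h3, hsorted⟩)]
    exact congrArg Prod.fst (outerA motif skeleton skeleton [] (by simp) [] 0)
  have e2 : infill_skeleton_alt skeleton motif = specGo motif skeleton 0 := by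
    unfold infill_skeleton_alt
    rw [if_neg (by simp [h1, h2]), if_neg (by push Not; exact ⟨h3, by simp [hany]⟩)]
    have hs := outerSlots skeleton skeleton [] (by simp) [] 0
    simp only [List.length_nil, Nat.cast_zero] at hs
    rw [hs]
    simp only [List.nil_append, Nat.zero_add, Int.toNat_natCast]
    have hsc := scatterFold skeleton ([] : List (Option String))
    simp only [List.length_nil, List.nil_append] at hsc
    rw [hsc]
    rw [congrArg Prod.fst (fillFold motif skeleton [] 0)]
    simp
  exact e1.trans e2.symm
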